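-- pv_equiv track=rewrite | github.com/BelousovMike/MicroserviceTemplate | restore_solution_folders.py | remove_old_nested_projects_section
-- ===== SOURCE A (Python) =====
-- from typing import Dict, List
--
-- def remove_old_nested_projects_section(sln_lines: List[str]) -> List[str]:
--     """Удаляет старую секцию GlobalSection(NestedProjects) из .sln файла."""
--     new_lines = []
--     in_nested = False
--     for line in sln_lines:
--         if "GlobalSection(NestedProjects)" in line:
--             in_nested = True
--             continue
--         if in_nested and line.strip() == "EndGlobalSection":
--             in_nested = False
--             continue
--         if not in_nested:
--             new_lines.append(line)
--     return new_lines
-- ===== SOURCE B (Python) =====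
-- def remove_old_nested_projects_section(sln_lines):
--     """Удаляет старую секцию GlobalSection(NestedProjects) из .sln файла."""
--     out = []
--     i = 0
--     n = len(sln_lines)
--     while i < n:
--         line = sln_lines[i]
--         i += 1
--         if "GlobalSection(NestedProjects)" in line:
--             # skip the section body up to and including its EndGlobalSection
--             while i < n and sln_lines[i].strip() != "EndGlobalSection":
--                 i += 1
--             i += 1
--         else:
--             out.append(line)
--     return out
-- ===== Notes on version B (the rewrite author's own statement) =====
-- stated objective: alternative
-- what changed: A filters with a single pass carrying an in_nested boolean through every line; B has no flag: an outer loop copies lines and, on seeing a section start, an inner skip loop advances the index past the section body and its EndGlobalSection (relying on the fact that a line containing the start marker can never strip to 'EndGlobalSection', which the Lean file proves).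
import Mathlib
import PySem

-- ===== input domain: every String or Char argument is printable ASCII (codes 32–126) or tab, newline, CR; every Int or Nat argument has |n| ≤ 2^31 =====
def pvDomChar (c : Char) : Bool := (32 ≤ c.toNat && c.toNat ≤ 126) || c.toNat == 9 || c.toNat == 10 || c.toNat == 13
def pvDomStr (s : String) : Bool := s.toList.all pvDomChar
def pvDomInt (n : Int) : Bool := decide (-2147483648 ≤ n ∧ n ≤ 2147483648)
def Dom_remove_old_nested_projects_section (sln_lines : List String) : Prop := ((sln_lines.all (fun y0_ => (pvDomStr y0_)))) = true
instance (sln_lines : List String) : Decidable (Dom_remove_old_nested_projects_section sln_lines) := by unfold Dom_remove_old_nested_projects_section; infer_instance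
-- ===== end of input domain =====

-- B replaces A's flag-carrying filter pass by an outer copy loop with an inner skip loop (no state flag); same cost, alternative decomposition.

-- ===== PORT A =====
-- literal port of A's loop body: state = (new_lines, in_nested), branches in A's order
def pvStepA (st : List String × Bool) (line : String) : List String × Bool :=
  if PySem.Str.isIn "GlobalSection(NestedProjects)" line then (st.1, true)
  else if st.2 && (PySem.Str.strip line == "EndGlobalSection") then (st.1, false)
  else if !st.2 then (st.1 ++ [line], st.2) else st

def remove_old_nested_projects_section (sln_lines : List String) : List String :=
  (sln_lines.foldl pvStepA (([] : List String), false)).1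

-- ===== PORT B =====
-- inner skip loop of B: drop lines until (and including) the one whose strip() == "EndGlobalSection"
def pvSkipNested : List String → List String
  | [] => []
  | l :: ls => if PySem.Str.strip l == "EndGlobalSection" then ls else pvSkipNested ls

theorem pvSkipNested_length_le (ls : List String) : (pvSkipNested ls).length ≤ ls.length := by
  induction ls with
  | nil => simp [pvSkipNested]
  | cons l ls ih =>
    simp only [pvSkipNested]
    split
    · simp
    · exact Nat.le_trans ih (Nat.le_succ _)

-- outer loop of B: copy lines; on a section start, continue after the inner skip
def pvGoB : List String → List String
  | [] => []
  | l :: ls =>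
    if PySem.Str.isIn "GlobalSection(NestedProjects)" l then pvGoB (pvSkipNested ls)
    else l :: pvGoB ls
termination_by ls => ls.length
decreasing_by
  · exact Nat.lt_succ_of_le (pvSkipNested_length_le ls)
  · exact Nat.lt_succ_self _

def remove_old_nested_projects_section_alt (sln_lines : List String) : List String :=
  pvGoB sln_lines

-- ===== PRECONDITION & SPEC =====
def Spec_remove_old_nested_projects_section (sln_lines : List String) (out : List String) : Prop := out = remove_old_nested_projects_section_alt sln_lines
instance (sln_lines : List String) (out : List String) : Decidable (Spec_remove_old_nested_projects_section sln_lines out) := by unfold Spec_remove_old_nested_projects_section; infer_instance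

-- ===== CLAIM (what is proved, stated in full; the proofs are below) =====
def Claim_equal_remove_old_nested_projects_section : Prop := ∀ (sln_lines : List String), Dom_remove_old_nested_projects_section sln_lines → Spec_remove_old_nested_projects_section sln_lines (remove_old_nested_projects_section sln_lines)

-- ===== LEMMAS AND PROOFS =====

-- Filtering away whitespace is unchanged by stripping (strip removes only whitespace).
theorem pvFilter_strip (l : List Char) :
    (PySem.Chars.strip l).filter (fun c => !PySem.Chars.isspace c)
      = l.filter (fun c => !PySem.Chars.isspace c) := by
  have hdrop : ∀ m : List Char, (m.dropWhile PySem.Chars.isspace).filter (fun c => !PySem.Chars.isspace c)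
      = m.filter (fun c => !PySem.Chars.isspace c) := by
    intro m
    conv_rhs => rw [← List.takeWhile_append_dropWhile (p := PySem.Chars.isspace) (l := m)]
    rw [List.filter_append]
    have : (m.takeWhile PySem.Chars.isspace).filter (fun c => !PySem.Chars.isspace c) = [] := by
      rw [List.filter_eq_nil_iff]
      intro c hc
      simp [List.mem_takeWhile_imp hc]
    rw [this, List.nil_append]
  unfold PySem.Chars.strip PySem.Chars.rstrip PySem.Chars.lstrip
  rw [List.filter_reverse, hdrop, ← List.filter_reverse, List.reverse_reverse, hdrop]

-- A line whose strip() is "EndGlobalSection" cannot contain the start marker.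
theorem pvNoMarker_of_strip_end (l : String)
    (h : PySem.Str.strip l = "EndGlobalSection") :
    PySem.Str.isIn "GlobalSection(NestedProjects)" l = false := by
  by_contra hc
  have htrue : PySem.Chars.isIn "GlobalSection(NestedProjects)".toList l.toList = true := by
    unfold PySem.Str.isIn at hc
    simpa using hc
  have hinf := (PySem.Chars.isIn_iff_infix _ _).mp htrue
  have hsub : List.Sublist "GlobalSection(NestedProjects)".toList l.toList := hinf.sublist
  have hfsub := hsub.filter (fun c => !PySem.Chars.isspace c)
  have hstrip : PySem.Chars.strip l.toList = "EndGlobalSection".toList := by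
    have := congrArg String.toList h
    simpa [PySem.Str.strip] using this
  have hm : "GlobalSection(NestedProjects)".toList.filter (fun c => !PySem.Chars.isspace c)
      = "GlobalSection(NestedProjects)".toList := by decide
  rw [hm, ← pvFilter_strip l.toList, hstrip] at hfsub
  have hlen := hfsub.length_le
  revert hlen
  decide

-- The bridge: A's fold from (acc, false) appends pvGoB, and from (acc, true) appends pvGoB ∘ pvSkipNested.
theorem pvBridge (ls : List String) : ∀ acc : List String,
    ((ls.foldl pvStepA (acc, false)).1 = acc ++ pvGoB ls)
    ∧ ((ls.foldl pvStepA (acc, true)).1 = acc ++ pvGoB (pvSkipNested ls)) := by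
  induction ls with
  | nil => intro acc; simp [pvGoB, pvSkipNested]
  | cons l ls ih =>
    intro acc
    constructor
    · rw [List.foldl_cons]
      by_cases hmark : PySem.Str.isIn "GlobalSection(NestedProjects)" l = true
      · have hstep : pvStepA (acc, false) l = (acc, true) := by
          unfold pvStepA; rw [if_pos hmark]
        rw [hstep, (ih acc).2, pvGoB, if_pos hmark]
      · have hstep : pvStepA (acc, false) l = (acc ++ [l], false) := by
          unfold pvStepA; rw [if_neg hmark]; simp
        rw [hstep, (ih (acc ++ [l])).1, pvGoB, if_neg hmark]
        simp
    · rw [List.foldl_cons]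
      by_cases hmark : PySem.Str.isIn "GlobalSection(NestedProjects)" l = true
      · have hne : (PySem.Str.strip l == "EndGlobalSection") = false := by
          by_cases hs : PySem.Str.strip l = "EndGlobalSection"
          · exfalso
            rw [pvNoMarker_of_strip_end l hs] at hmark
            exact Bool.false_ne_true hmark
          · simpa using hs
        have hstep : pvStepA (acc, true) l = (acc, true) := by
          unfold pvStepA; rw [if_pos hmark]
        rw [hstep, (ih acc).2, pvSkipNested, if_neg (by rw [hne]; simp)]
      · by_cases hend : (PySem.Str.strip l == "EndGlobalSection") = true
        · have hstep : pvStepA (acc, true) l = (acc, false) := by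
            unfold pvStepA; rw [if_neg hmark]; simp [hend]
          rw [hstep, (ih acc).1, pvSkipNested, if_pos hend]
        · have hend' : (PySem.Str.strip l == "EndGlobalSection") = false := by
            simpa using hend
          have hstep : pvStepA (acc, true) l = (acc, true) := by
            unfold pvStepA; rw [if_neg hmark]; simp [hend']
          rw [hstep, (ih acc).2, pvSkipNested, if_neg (by rw [hend']; simp)]

-- ===== VERDICT (by name: the statement is the Claim_ definition above) =====
theorem remove_old_nested_projects_section_spec : Claim_equal_remove_old_nested_projects_section := by
  intro ls _
  unfold Spec_remove_old_nested_projects_section remove_old_nested_projects_section remove_old_nested_projects_section_alt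
  simpa using (pvBridge ls []).1
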